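-- pv_equiv track=rewrite | github.com/webbnzhong-commits/Modeling-E.-Coli---Evolution-Speed-VS-Fitness-git2 | hub_runner.py | _format_id_span
-- ===== SOURCE A (Python) =====
-- def _format_id_span(ids: list[int]) -> str:
--     if not ids:
--         return "none"
--     ordered = sorted(set(int(x) for x in ids))
--     if len(ordered) == 1:
--         return str(ordered[0])
--     contiguous = all((ordered[i] + 1) == ordered[i + 1] for i in range(len(ordered) - 1))
--     if contiguous:
--         return f"{ordered[0]}-{ordered[-1]}"
--     return ",".join(str(x) for x in ordered)
-- ===== SOURCE B (Python) =====
-- def _format_id_span(ids: list[int]) -> str: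
--     if not ids:
--         return "none"
--     distinct = set(int(x) for x in ids)
--     lo, hi = min(distinct), max(distinct)
--     if lo == hi:
--         return str(lo)
--     if hi - lo + 1 == len(distinct):
--         return f"{lo}-{hi}"
--     return ",".join(str(x) for x in sorted(distinct))
-- ===== Notes on version B (the rewrite author's own statement) =====
-- stated objective: alternative
-- what changed: Replaces the sort-then-pairwise-scan contiguity test by a min/max-vs-count closed form: B computes lo=min, hi=max of the distinct ids directly (no sort in the singleton and contiguous-range cases), decides contiguity by hi-lo+1 == len(distinct), and only sorts when it must emit the comma-joined list.
import Mathlib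
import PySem

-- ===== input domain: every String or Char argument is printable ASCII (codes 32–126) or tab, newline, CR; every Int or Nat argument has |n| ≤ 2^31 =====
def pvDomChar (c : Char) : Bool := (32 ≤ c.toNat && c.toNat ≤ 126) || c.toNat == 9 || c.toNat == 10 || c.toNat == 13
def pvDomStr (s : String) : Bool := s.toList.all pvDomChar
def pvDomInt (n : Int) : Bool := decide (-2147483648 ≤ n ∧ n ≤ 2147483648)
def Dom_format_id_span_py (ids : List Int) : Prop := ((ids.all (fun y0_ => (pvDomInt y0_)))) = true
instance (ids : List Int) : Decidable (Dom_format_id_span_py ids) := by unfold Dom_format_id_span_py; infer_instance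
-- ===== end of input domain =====

-- B replaces A's sort-then-pairwise-scan contiguity test by the min/max-vs-distinct-count
-- closed form, sorting only for the comma-joined fallback (objective: alternative).

-- ===== PORT A =====
def format_id_span_py (ids : List Int) : String :=
  if ids = [] then "none"
  else
    let ordered := PySem.List.sorted (PySem.Set.ofList ids) (fun x => x) false
    if ordered.length = 1 then PySem.Int.toStr (PySem.List.pyGetD ordered 0 0)
    else
      let contiguous := (PySem.List.pyRange 0 ((ordered.length : Int) - 1) 1).all
        (fun i => PySem.List.pyGetD ordered i 0 + 1 == PySem.List.pyGetD ordered (i + 1) 0)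
      if contiguous then
        PySem.Int.toStr (PySem.List.pyGetD ordered 0 0) ++ "-" ++
          PySem.Int.toStr (PySem.List.pyGetD ordered (-1) 0)
      else PySem.Str.join "," (ordered.map PySem.Int.toStr)

-- ===== PORT B =====
def format_id_span_py_alt (ids : List Int) : String :=
  if ids = [] then "none"
  else
    let distinct : PySem.Set Int := PySem.Set.ofList ids
    let lo := (PySem.List.min? distinct (fun x => x)).getD 0
    let hi := (PySem.List.max? distinct (fun x => x)).getD 0
    if lo = hi then PySem.Int.toStr lo
    else if hi - lo + 1 = PySem.Set.len distinct then
      PySem.Int.toStr lo ++ "-" ++ PySem.Int.toStr hi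
    else PySem.Str.join "," ((PySem.List.sorted distinct (fun x => x) false).map PySem.Int.toStr)

-- ===== PRECONDITION & SPEC =====
def Spec_format_id_span_py (ids : List Int) (out : String) : Prop := out = format_id_span_py_alt ids
instance (ids : List Int) (out : String) : Decidable (Spec_format_id_span_py ids out) := by unfold Spec_format_id_span_py; infer_instance

-- ===== CLAIM (what is proved, stated in full; the proofs are below) =====
def Claim_equal_format_id_span_py : Prop := ∀ (ids : List Int), Dom_format_id_span_py ids → Spec_format_id_span_py ids (format_id_span_py ids)

-- ===== LEMMAS AND PROOFS =====

-- the getLast of a strictly increasing list is at least head + (length of tail)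
theorem pv_last_ge (L : List Int) : ∀ (x : Int), (x :: L).Pairwise (· < ·) →
    x + (L.length : Int) ≤ (x :: L).getLast (List.cons_ne_nil x L) := by
  induction L with
  | nil => intro x _; simp
  | cons y t ih =>
    intro x h
    have hxy : x < y := (List.pairwise_cons.mp h).1 y (by simp)
    have h2 : (y :: t).Pairwise (· < ·) := (List.pairwise_cons.mp h).2
    have := ih y h2
    rw [List.getLast_cons (List.cons_ne_nil y t)]
    simp only [List.length_cons] at *
    push_cast at *
    omega

-- a +1-chain ends exactly at head + (length of tail)
theorem pv_chain_last (L : List Int) : ∀ (x : Int),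
    List.IsChain (fun a b => a + 1 = b) (x :: L) →
    (x :: L).getLast (List.cons_ne_nil x L) = x + (L.length : Int) := by
  induction L with
  | nil => intro x _; simp
  | cons y t ih =>
    intro x h
    rw [List.isChain_cons_cons] at h
    have := ih y h.2
    rw [List.getLast_cons (List.cons_ne_nil y t)]
    simp only [List.length_cons] at *
    push_cast at *
    omega

-- a strictly increasing list that is not a +1-chain overshoots head + (length of tail)
theorem pv_notchain_last (L : List Int) : ∀ (x : Int), (x :: L).Pairwise (· < ·) →
    ¬ List.IsChain (fun a b => a + 1 = b) (x :: L) →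
    x + (L.length : Int) < (x :: L).getLast (List.cons_ne_nil x L) := by
  induction L with
  | nil => intro x _ hc; exact absurd (List.isChain_singleton x) hc
  | cons y t ih =>
    intro x h hc
    have hxy : x < y := (List.pairwise_cons.mp h).1 y (by simp)
    have h2 : (y :: t).Pairwise (· < ·) := (List.pairwise_cons.mp h).2
    rw [List.isChain_cons_cons, not_and_or] at hc
    rw [List.getLast_cons (List.cons_ne_nil y t)]
    rcases hc with hc | hc
    · have := pv_last_ge t y h2
      simp only [List.length_cons] at *
      push_cast at *
      omega
    · have := ih y h2 hc
      simp only [List.length_cons] at *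
      push_cast at *
      omega

-- in a ≤-sorted list every element is at most the last
theorem pv_le_last (L : List Int) (h : L.Pairwise (· ≤ ·)) (hne : L ≠ []) :
    ∀ y ∈ L, y ≤ L.getLast hne := by
  induction L with
  | nil => simp
  | cons x t ih =>
    intro y hy
    cases hy with
    | head =>
      cases t with
      | nil => simp
      | cons z u =>
        rw [List.getLast_cons (List.cons_ne_nil z u)]
        have hlast : (z :: u).getLast (List.cons_ne_nil z u) ∈ z :: u := List.getLast_mem _
        exact (List.pairwise_cons.mp h).1 _ hlast
    | tail _ hy =>
      cases t with
      | nil => cases hy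
      | cons z u =>
        rw [List.getLast_cons (List.cons_ne_nil z u)]
        exact ih (List.pairwise_cons.mp h).2 (List.cons_ne_nil z u) y hy

-- A's index-scan contiguity test is the IsChain predicate
theorem pv_all_iff_chain (L : List Int) :
    ((PySem.List.pyRange 0 ((L.length : Int) - 1) 1).all
      (fun i => PySem.List.pyGetD L i 0 + 1 == PySem.List.pyGetD L (i + 1) 0)) = true ↔
    List.IsChain (fun a b : Int => a + 1 = b) L := by
  rw [PySem.List.pyRange_one, List.all_map, List.all_eq_true, List.isChain_iff_getElem]
  constructor
  · intro h i hi
    have hmem : i ∈ List.range ((L.length : Int) - 1 - 0).toNat := by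
      rw [List.mem_range]; omega
    have := h i hmem
    simp only [Function.comp_apply, beq_iff_eq] at this
    have h1 : PySem.List.pyGetD L ((0 : Int) + (i : Int)) 0 = L.getD i 0 := by
      rw [zero_add, PySem.List.pyGetD_natCast]
    have h2 : PySem.List.pyGetD L ((0 : Int) + (i : Int) + 1) 0 = L.getD (i + 1) 0 := by
      have : (0 : Int) + (i : Int) + 1 = ((i + 1 : Nat) : Int) := by push_cast; ring
      rw [this, PySem.List.pyGetD_natCast]
    rw [h1, h2] at this
    rw [List.getD_eq_getElem L 0 (by omega), List.getD_eq_getElem L 0 hi] at this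
    exact this
  · intro h i hmem
    rw [List.mem_range] at hmem
    have hi : i + 1 < L.length := by omega
    simp only [Function.comp_apply, beq_iff_eq]
    have h1 : PySem.List.pyGetD L ((0 : Int) + (i : Int)) 0 = L.getD i 0 := by
      rw [zero_add, PySem.List.pyGetD_natCast]
    have h2 : PySem.List.pyGetD L ((0 : Int) + (i : Int) + 1) 0 = L.getD (i + 1) 0 := by
      have : (0 : Int) + (i : Int) + 1 = ((i + 1 : Nat) : Int) := by push_cast; ring
      rw [this, PySem.List.pyGetD_natCast]
    rw [h1, h2, List.getD_eq_getElem L 0 (by omega), List.getD_eq_getElem L 0 hi]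
    exact h i hi

-- ===== VERDICT (by name: the statement is the Claim_ definition above) =====
theorem format_id_span_py_spec : Claim_equal_format_id_span_py := by
  unfold Claim_equal_format_id_span_py Spec_format_id_span_py
  intro ids _
  unfold format_id_span_py format_id_span_py_alt
  by_cases hids : ids = []
  · simp [hids]
  · simp only [hids, if_false]
    set s : List Int := PySem.Set.ofList ids with hs
    set L : List Int := PySem.List.sorted s (fun x => x) false with hLdef
    -- nonemptiness
    have hsne : s ≠ [] := by
      cases ids with
      | nil => exact absurd rfl hids
      | cons a t =>
        intro hnil
        have : a ∈ s := (PySem.Set.mem_ofList _ _).mpr (by simp)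
        rw [hnil] at this; cases this
    have hLne : L ≠ [] := by
      rw [hLdef, Ne, PySem.List.sorted_eq_nil_iff]; exact hsne
    obtain ⟨m, t, hL⟩ := List.exists_cons_of_ne_nil hLne
    have hlt : L.Pairwise (· < ·) := PySem.List.sorted_ofList_pairwise_lt ids
    have hperm : L.Perm s := PySem.List.sorted_perm s (fun x => x) false
    have hlen : L.length = s.length := hperm.length_eq
    -- min / max
    obtain ⟨lo, hlo⟩ : ∃ lo, PySem.List.min? s (fun x => x) = some lo := by
      cases hmin : PySem.List.min? s (fun x => x) with
      | none => exact absurd ((PySem.List.min?_eq_none_iff s _).mp hmin) hsne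
      | some v => exact ⟨v, rfl⟩
    obtain ⟨hi, hhi⟩ : ∃ hi, PySem.List.max? s (fun x => x) = some hi := by
      cases hmax : PySem.List.max? s (fun x => x) with
      | none => exact absurd ((PySem.List.max?_eq_none_iff s _).mp hmax) hsne
      | some v => exact ⟨v, rfl⟩
    -- lo is the head of L
    have hlo_eq : lo = m := by
      have h1 : m ≤ lo :=
        PySem.List.key_head_sorted_le s (fun x => x) hL lo (PySem.List.min?_mem hlo)
      have h2 : lo ≤ m := by
        refine PySem.List.min?_isMin hlo m ?_
        have : m ∈ L := by rw [hL]; simp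
        exact (PySem.List.mem_sorted s _ false m).mp this
      omega
    -- hi is the last of L
    have hhi_eq : hi = L.getLast hLne := by
      have hlastmem : L.getLast hLne ∈ L := List.getLast_mem hLne
      have h1 : L.getLast hLne ≤ hi :=
        PySem.List.max?_isMax hhi _ ((PySem.List.mem_sorted s _ false _).mp hlastmem)
      have h2 : hi ≤ L.getLast hLne := by
        refine pv_le_last L (hlt.imp (fun h => le_of_lt h)) hLne hi ?_
        exact (PySem.List.mem_sorted s _ false hi).mpr (PySem.List.max?_mem hhi)
      omega
    have hlast_cons : L.getLast hLne = (m :: t).getLast (List.cons_ne_nil m t) := by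
      congr 1
    have hlt_cons : (m :: t).Pairwise (· < ·) := hL ▸ hlt
    have hlast_ge : m + (t.length : Int) ≤ (m :: t).getLast (List.cons_ne_nil m t) :=
      pv_last_ge t m hlt_cons
    simp only [hlo, hhi, Option.getD_some]
    -- case: singleton
    by_cases h1 : L.length = 1
    · have ht : t = [] := by
        have : (m :: t).length = 1 := by rw [← hL]; exact h1
        simpa using this
      have hlohi : lo = hi := by
        rw [hlo_eq, hhi_eq, hlast_cons, ht]; simp
      rw [if_pos h1, if_pos hlohi, hlo_eq]
      have : PySem.List.pyGetD L 0 0 = m := by rw [hL, PySem.List.pyGetD_zero_cons]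
      rw [this]
    · -- L has at least two elements
      have hlen2 : 2 ≤ L.length := by
        have : L.length ≠ 0 := by simp [hLne]
        omega
      have htne : t ≠ [] := by
        intro h; rw [hL, h] at hlen2; simp at hlen2
      have htlen : 1 ≤ t.length := by
        cases t with
        | nil => exact absurd rfl htne
        | cons _ _ => simp
      have hlohi : lo ≠ hi := by
        rw [hlo_eq, hhi_eq, hlast_cons]
        intro heq
        have hLlen : L.length = t.length + 1 := by rw [hL]; simp
        rw [← heq] at hlast_ge
        omega
      rw [if_neg h1, if_neg hlohi]
      have hhead : PySem.List.pyGetD L 0 0 = m := by rw [hL, PySem.List.pyGetD_zero_cons]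
      have hneg1 : PySem.List.pyGetD L (-1) 0 = L.getLast hLne := PySem.List.pyGetD_neg_one L 0 hLne
      have hslen : PySem.Set.len s = (L.length : Int) := by
        simp only [PySem.Set.len, hlen]
      have hLlen : (L.length : Int) = (t.length : Int) + 1 := by rw [hL]; simp
      -- contiguity tests coincide
      have hcontig :
          ((PySem.List.pyRange 0 ((L.length : Int) - 1) 1).all
            (fun i => PySem.List.pyGetD L i 0 + 1 == PySem.List.pyGetD L (i + 1) 0)) = true ↔
          hi - lo + 1 = PySem.Set.len s := by
        rw [pv_all_iff_chain L, hslen, hlo_eq, hhi_eq, hlast_cons, hLlen, hL]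
        constructor
        · intro hch
          have := pv_chain_last t m hch
          omega
        · intro heq
          by_contra hch
          have := pv_notchain_last t m hlt_cons hch
          omega
      by_cases hc : ((PySem.List.pyRange 0 ((L.length : Int) - 1) 1).all
          (fun i => PySem.List.pyGetD L i 0 + 1 == PySem.List.pyGetD L (i + 1) 0)) = true
      · rw [if_pos hc, if_pos (hcontig.mp hc), hhead, hneg1, hlo_eq, hhi_eq]
      · rw [if_neg hc, if_neg (fun h => hc (hcontig.mpr h))]
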